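-- pv_equiv track=rewrite | github.com/boblsturm/folkplagiarism | similarity/ngrams.py | find_plagiarism
-- ===== SOURCE A (Python) =====
-- from collections import Counter, defaultdict
--
-- def index_ngrams(tunes, ngram_size):
--     total = Counter()
--     ngram_occurrences = defaultdict(list)
--     all_tune_ngrams = []
--     all_tune_ngram_counts = []
--     for tune_id, tune in enumerate(tunes):
--         tune_ngrams = get_ngrams(tune, ngram_size)
--         tune_ngram_counts = Counter(tune_ngrams)
--         total += tune_ngram_counts
--         all_tune_ngrams.append(tune_ngrams)
--         all_tune_ngram_counts.append(tune_ngram_counts)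
--         for pos, ngram in enumerate(tune_ngrams):
--             ngram_occurrences[ngram].append({
--                 'tune_id': tune_id,
--                 'pos': pos
--             })
--     return total, ngram_occurrences, all_tune_ngrams, all_tune_ngram_counts
--
-- def get_ngrams(intervals, ngram_size):
--     """
--     Get list of ngrams (tuples) with length `ngram_size` found in `intervals`.
--     """
--     ngrams = [
--         tuple(intervals[pos : pos + ngram_size])
--         for pos in range(len(intervals) - ngram_size + 1)
--     ]
--     return ngrams
--
-- def find_plagiarism(training_tunes, generated_tunes, ngram_size):
--     # ngram_sizes = [2]
--     training_ngrams = index_ngrams(training_tunes, ngram_size)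
--     generated_ngrams = index_ngrams(generated_tunes, ngram_size)
--     plagiarisms = []
--     for tune, tune_ngrams in zip(generated_tunes, generated_ngrams[2]):
--         occurrences_in_training = {}
--         for ngram in tune_ngrams:
--             occurrences_in_training[ngram] = training_ngrams[0].get(ngram, 0)
--         plagiarisms.append(occurrences_in_training)
--
--     return plagiarisms
-- ===== SOURCE B (Python) =====
-- def find_plagiarism(training_tunes, generated_tunes, ngram_size):
--     # Index-free: no Counter/index over the training corpus. Each distinct
--     # ngram of a generated tune is counted on demand by a direct sliding-window
--     # scan over the training tunes; the result dict itself memoizes per tune.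
--     def occurrences(ng):
--         total = 0
--         for tune in training_tunes:
--             for i in range(len(tune) - ngram_size + 1):
--                 if tuple(tune[i:i + ngram_size]) == ng:
--                     total += 1
--         return total
--
--     result = []
--     for tune in generated_tunes:
--         d = {}
--         for i in range(len(tune) - ngram_size + 1):
--             ng = tuple(tune[i:i + ngram_size])
--             if ng not in d:
--                 d[ng] = occurrences(ng)
--         result.append(d)
--     return result
-- ===== Notes on version B (the rewrite author's own statement) =====
-- stated objective: simpler
-- what changed: B removes the counting data structure entirely: instead of building a Counter index over all training ngrams and looking each generated ngram up, it counts each distinct generated ngram on demand by a direct sliding-window scan over the training tunes (the per-tune result dict itself serves as the memo), so no index_ngrams, no Counter merging and no occurrence tables exist in B.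
import Mathlib
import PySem

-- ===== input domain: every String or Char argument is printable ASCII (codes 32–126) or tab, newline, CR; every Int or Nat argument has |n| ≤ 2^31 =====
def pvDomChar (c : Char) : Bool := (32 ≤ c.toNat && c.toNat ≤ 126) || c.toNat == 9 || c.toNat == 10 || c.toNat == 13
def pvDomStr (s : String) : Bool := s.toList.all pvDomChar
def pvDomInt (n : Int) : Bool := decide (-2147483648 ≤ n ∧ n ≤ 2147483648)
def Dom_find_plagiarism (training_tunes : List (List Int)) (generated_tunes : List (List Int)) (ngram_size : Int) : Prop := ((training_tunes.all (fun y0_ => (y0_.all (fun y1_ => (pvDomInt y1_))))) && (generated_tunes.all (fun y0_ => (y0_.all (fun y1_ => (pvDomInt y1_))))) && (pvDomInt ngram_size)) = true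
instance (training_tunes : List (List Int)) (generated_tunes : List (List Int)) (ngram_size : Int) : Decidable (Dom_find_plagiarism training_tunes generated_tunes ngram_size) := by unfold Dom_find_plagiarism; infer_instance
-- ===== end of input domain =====

-- B drops A's Counter/index machinery and counts each distinct generated ngram by a
-- direct scan over the training tunes; neither program mutates its arguments.

-- ===== PORT A =====

-- get_ngrams(intervals, ngram_size): [tuple(intervals[pos:pos+n]) for pos in range(len(intervals)-n+1)]
def get_ngramsA (intervals : List Int) (n : Int) : List (List Int) :=
  (PySem.List.pyRange 0 ((intervals.length : Int) - n + 1) 1).map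
    (fun pos => PySem.List.slice intervals (some pos) (some (pos + n)))

-- Counter += Counter: for k, v in other.items(): self[k] = self.get(k, 0) + v
-- (Counter.__iadd__ also drops non-positive totals; all counts here are >= 1, so that branch never fires)
def mergeCounter (t c : PySem.Dict (List Int) Int) : PySem.Dict (List Int) Int :=
  c.items.foldl (fun t kv => t.insert kv.1 (t.getD kv.1 0 + kv.2)) t

-- index_ngrams(tunes, ngram_size); the occurrence records {'tune_id': i, 'pos': p} are ported as
-- the pair (i, p) (exact for the behaviour used: this component is never read by find_plagiarism)
def index_ngramsA (tunes : List (List Int)) (n : Int) :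
    PySem.Dict (List Int) Int × PySem.Dict (List Int) (List (Int × Int))
      × List (List (List Int)) × List (PySem.Dict (List Int) Int) :=
  (PySem.List.enumerate tunes 0).foldl
    (fun st p =>
      let tune_ngrams := get_ngramsA p.2 n
      let tune_ngram_counts := PySem.Dict.counter tune_ngrams
      let total := mergeCounter st.1 tune_ngram_counts
      let occ := (PySem.List.enumerate tune_ngrams 0).foldl
        (fun o q => o.modify q.2 [] (· ++ [(p.1, q.1)])) st.2.1
      (total, occ, st.2.2.1 ++ [tune_ngrams], st.2.2.2 ++ [tune_ngram_counts]))
    (PySem.Dict.empty, PySem.Dict.empty, [], [])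

def find_plagiarism (training_tunes : List (List Int)) (generated_tunes : List (List Int)) (ngram_size : Int) : List (List (List Int × Int)) :=
  let training_ngrams := index_ngramsA training_tunes ngram_size
  let generated_ngrams := index_ngramsA generated_tunes ngram_size
  (generated_tunes.zip generated_ngrams.2.2.1).foldl
    (fun plagiarisms p =>
      plagiarisms ++
        [(p.2.foldl (fun d ngram => d.insert ngram (training_ngrams.1.getD ngram 0))
            PySem.Dict.empty).items])
    []

-- ===== PORT B =====

-- occurrences(ng): nested for-loops, total += 1 whenever tuple(tune[i:i+n]) == ng
def occB (training_tunes : List (List Int)) (n : Int) (ng : List Int) : Int :=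
  training_tunes.foldl
    (fun total tune =>
      (PySem.List.pyRange 0 ((tune.length : Int) - n + 1) 1).foldl
        (fun total i =>
          if PySem.List.slice tune (some i) (some (i + n)) = ng then total + 1 else total)
        total)
    0

def find_plagiarism_alt (training_tunes : List (List Int)) (generated_tunes : List (List Int)) (ngram_size : Int) : List (List (List Int × Int)) :=
  (generated_tunes.foldl
    (fun result tune =>
      let d := (PySem.List.pyRange 0 ((tune.length : Int) - ngram_size + 1) 1).foldl
        (fun d i =>
          let ng := PySem.List.slice tune (some i) (some (i + ngram_size))
          if d.contains ng then d else d.insert ng (occB training_tunes ngram_size ng))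
        PySem.Dict.empty
      result ++ [d])
    []).map PySem.Dict.items

-- ===== PRECONDITION & SPEC =====
def Spec_find_plagiarism (training_tunes : List (List Int)) (generated_tunes : List (List Int)) (ngram_size : Int) (out : List (List (List Int × Int))) : Prop := out = find_plagiarism_alt training_tunes generated_tunes ngram_size
instance (training_tunes : List (List Int)) (generated_tunes : List (List Int)) (ngram_size : Int) (out : List (List (List Int × Int))) : Decidable (Spec_find_plagiarism training_tunes generated_tunes ngram_size out) := by unfold Spec_find_plagiarism; infer_instance

-- ===== CLAIM =====
def Claim_equal_find_plagiarism : Prop := ∀ (training_tunes : List (List Int)) (generated_tunes : List (List Int)) (ngram_size : Int), Dom_find_plagiarism training_tunes generated_tunes ngram_size → Spec_find_plagiarism training_tunes generated_tunes ngram_size (find_plagiarism training_tunes generated_tunes ngram_size)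

-- ===== LEMMAS AND PROOFS =====

-- fold of insert-with-computed-value over distinct keys, read back at q
theorem foldl_insert_add_getD (q : List Int) (f : List Int → Int) :
    ∀ (ks : List (List Int)) (t : PySem.Dict (List Int) Int), ks.Nodup →
      (ks.foldl (fun t k => t.insert k (t.getD k 0 + f k)) t).getD q 0 =
        t.getD q 0 + (if q ∈ ks then f q else 0) := by
  intro ks
  induction ks with
  | nil => intro t _; simp
  | cons k ks ih =>
    intro t hnd
    simp only [List.nodup_cons] at hnd
    simp only [List.foldl_cons, ih _ hnd.2]
    rw [PySem.Dict.getD_insert]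
    by_cases hq : q = k
    · subst hq
      simp [hnd.1]
    · simp [hq, List.mem_cons]

theorem mergeCounter_getD (t : PySem.Dict (List Int) Int) (ys : List (List Int)) (q : List Int) :
    (mergeCounter t (PySem.Dict.counter ys)).getD q 0 = t.getD q 0 + (ys.count q : Int) := by
  unfold mergeCounter
  rw [PySem.Dict.items_counter, List.foldl_map]
  refine Eq.trans
    (foldl_insert_add_getD q (fun k => ((ys.count k : Nat) : Int)) (PySem.Set.ofList ys) t
      (PySem.Set.nodup_ofList ys)) ?_
  by_cases hq : q ∈ ys
  · simp [PySem.Set.mem_ofList, hq]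
  · simp [PySem.Set.mem_ofList, hq, List.count_eq_zero_of_not_mem hq]

-- A's running total over a list of tunes
theorem total_getD (n : Int) (q : List Int) :
    ∀ (xs : List (List Int)) (t : PySem.Dict (List Int) Int),
      (xs.foldl (fun t tune => mergeCounter t (PySem.Dict.counter (get_ngramsA tune n))) t).getD q 0 =
        t.getD q 0 + (xs.map (fun tune => (((get_ngramsA tune n).count q : Nat) : Int))).sum := by
  intro xs
  induction xs with
  | nil => intro t; simp
  | cons x xs ih =>
    intro t
    simp only [List.foldl_cons, ih, mergeCounter_getD, List.map_cons, List.sum_cons]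
    ring

-- the two projections of index_ngramsA's loop that find_plagiarism reads
theorem index_fold_proj (n : Int) :
    ∀ (l : List (Int × List Int))
      (st : PySem.Dict (List Int) Int × PySem.Dict (List Int) (List (Int × Int))
            × List (List (List Int)) × List (PySem.Dict (List Int) Int)),
      (l.foldl (fun st p =>
        let tune_ngrams := get_ngramsA p.2 n
        let tune_ngram_counts := PySem.Dict.counter tune_ngrams
        let total := mergeCounter st.1 tune_ngram_counts
        let occ := (PySem.List.enumerate tune_ngrams 0).foldl
          (fun o q => o.modify q.2 [] (· ++ [(p.1, q.1)])) st.2.1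
        (total, occ, st.2.2.1 ++ [tune_ngrams], st.2.2.2 ++ [tune_ngram_counts])) st).1 =
        l.foldl (fun t p => mergeCounter t (PySem.Dict.counter (get_ngramsA p.2 n))) st.1
      ∧
      (l.foldl (fun st p =>
        let tune_ngrams := get_ngramsA p.2 n
        let tune_ngram_counts := PySem.Dict.counter tune_ngrams
        let total := mergeCounter st.1 tune_ngram_counts
        let occ := (PySem.List.enumerate tune_ngrams 0).foldl
          (fun o q => o.modify q.2 [] (· ++ [(p.1, q.1)])) st.2.1
        (total, occ, st.2.2.1 ++ [tune_ngrams], st.2.2.2 ++ [tune_ngram_counts])) st).2.2.1 =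
        st.2.2.1 ++ l.map (fun p => get_ngramsA p.2 n) := by
  intro l
  induction l with
  | nil => intro st; simp
  | cons p l ih =>
    intro st
    simp only [List.foldl_cons, List.map_cons]
    refine ⟨((ih _).1), ?_⟩
    rw [(ih _).2]
    simp

-- fold over enumerate ignoring the index is a fold over the list
theorem foldl_enumerate_snd {β : Type} (g : β → List Int → β) :
    ∀ (xs : List (List Int)) (s : Int) (init : β),
      (PySem.List.enumerate xs s).foldl (fun t p => g t p.2) init = xs.foldl g init := by
  intro xs
  induction xs with
  | nil => intro s init; simp [PySem.List.enumerate_nil]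
  | cons x xs ih => intro s init; rw [PySem.List.enumerate_cons]; simp only [List.foldl_cons]; exact ih _ _

theorem map_enumerate_snd {β : Type} (f : List Int → β) (xs : List (List Int)) (s : Int) :
    (PySem.List.enumerate xs s).map (fun p => f p.2) = xs.map f := by
  have h := PySem.List.map_snd_enumerate xs s
  calc (PySem.List.enumerate xs s).map (fun p => f p.2)
      = ((PySem.List.enumerate xs s).map (·.2)).map f := by rw [List.map_map]; rfl
    _ = xs.map f := by rw [h]

theorem index_total_getD (tunes : List (List Int)) (n : Int) (q : List Int) :
    (index_ngramsA tunes n).1.getD q 0 =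
      (tunes.map (fun tune => (((get_ngramsA tune n).count q : Nat) : Int))).sum := by
  unfold index_ngramsA
  rw [(index_fold_proj n _ _).1,
    foldl_enumerate_snd (fun t tune => mergeCounter t (PySem.Dict.counter (get_ngramsA tune n))) tunes 0 _,
    total_getD]
  simp

theorem index_third (tunes : List (List Int)) (n : Int) :
    (index_ngramsA tunes n).2.2.1 = tunes.map (fun tune => get_ngramsA tune n) := by
  unfold index_ngramsA
  rw [(index_fold_proj n _ _).2, map_enumerate_snd (fun tune => get_ngramsA tune n) tunes 0]
  simp

-- B's inner counting loop is list.count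
theorem foldl_count_if (ng : List Int) :
    ∀ (l : List (List Int)) (init : Int),
      l.foldl (fun total x => if x = ng then total + 1 else total) init =
        init + (l.count ng : Int) := by
  intro l
  induction l with
  | nil => intro init; simp
  | cons x l ih =>
    intro init
    simp only [List.foldl_cons, ih]
    by_cases hx : x = ng
    · subst hx; rw [if_pos rfl, List.count_cons_self]; push_cast; ring
    · rw [if_neg hx, List.count_cons_of_ne (fun h => hx h)]

-- occurrences(ng) is the sum over training tunes of ng's count among that tune's ngrams
theorem occB_go (n : Int) (ng : List Int) :
    ∀ (tt : List (List Int)) (init : Int),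
      tt.foldl
        (fun total tune =>
          (PySem.List.pyRange 0 ((tune.length : Int) - n + 1) 1).foldl
            (fun total i =>
              if PySem.List.slice tune (some i) (some (i + n)) = ng then total + 1 else total)
            total)
        init =
      init + (tt.map (fun tune => (((get_ngramsA tune n).count ng : Nat) : Int))).sum := by
  intro tt
  induction tt with
  | nil => intro init; simp
  | cons t ts ih =>
    intro init
    simp only [List.foldl_cons, List.map_cons, List.sum_cons]
    rw [ih]
    have : (PySem.List.pyRange 0 ((t.length : Int) - n + 1) 1).foldl
        (fun total i =>
          if PySem.List.slice t (some i) (some (i + n)) = ng then total + 1 else total)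
        init = init + ((get_ngramsA t n).count ng : Int) := by
      calc (PySem.List.pyRange 0 ((t.length : Int) - n + 1) 1).foldl
            (fun total i =>
              if PySem.List.slice t (some i) (some (i + n)) = ng then total + 1 else total)
            init
          = (get_ngramsA t n).foldl (fun total x => if x = ng then total + 1 else total) init := by
            unfold get_ngramsA; rw [List.foldl_map]
        _ = init + ((get_ngramsA t n).count ng : Int) := foldl_count_if ng (get_ngramsA t n) init
    rw [this]
    ring

theorem occB_eq (tt : List (List Int)) (n : Int) (ng : List Int) :
    occB tt n ng = (tt.map (fun tune => (((get_ngramsA tune n).count ng : Nat) : Int))).sum := by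
  unfold occB
  rw [occB_go]
  ring

-- overwriting a key with its present value changes nothing
theorem insert_same (d : PySem.Dict (List Int) Int) (k : List Int) (v : Int)
    (hnd : d.keys.Nodup) (h : d.get? k = some v) : d.insert k v = d := by
  apply PySem.Dict.ext
  rw [PySem.Dict.items_insert_of_contains _ _
    (by rw [PySem.Dict.contains_eq_isSome_get?, h]; rfl)]
  conv_rhs => rw [← List.map_id d.items]
  apply List.map_congr_left
  intro p hp
  by_cases hk : p.1 == k
  · have hk' : p.1 = k := eq_of_beq hk
    have := PySem.Dict.get?_of_mem_items (d := d) (k := p.1) (v := p.2) (by simpa using hp) hnd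
    rw [hk', h] at this
    have hv : v = p.2 := Option.some_injective _ this
    rw [if_pos hk, ← hk', hv]; rfl
  · simp [hk]

-- the membership-guarded insert fold equals the plain insert fold when every stored value is f of its key
theorem guard_fold (f : List Int → Int) :
    ∀ (l : List (List Int)) (d : PySem.Dict (List Int) Int), d.keys.Nodup →
      (∀ k v, d.get? k = some v → v = f k) →
      l.foldl (fun d ng => if d.contains ng then d else d.insert ng (f ng)) d =
        l.foldl (fun d ng => d.insert ng (f ng)) d := by
  intro l
  induction l with
  | nil => intro d _ _; rfl
  | cons x l ih =>
    intro d hnd hinv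
    simp only [List.foldl_cons]
    by_cases hc : d.contains x
    · rw [if_pos hc]
      have hv : d.get? x = some (f x) := by
        rw [PySem.Dict.contains_eq_isSome_get?] at hc
        rcases Option.isSome_iff_exists.mp hc with ⟨v, hv⟩
        rw [hv, hinv x v hv]
      have hd : d.insert x (f x) = d := insert_same d x (f x) hnd hv
      rw [hd]
      exact ih _ hnd hinv
    · rw [if_neg hc]
      refine ih _ (PySem.Dict.nodup_keys_insert _ _ _ hnd) ?_
      intro k v hkv
      rw [PySem.Dict.get?_insert] at hkv
      by_cases hk : k = x
      · rw [if_pos hk] at hkv; rw [hk]; exact (Option.some.injEq _ _ ▸ hkv).symm ▸ rfl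
      · rw [if_neg hk] at hkv; exact hinv k v hkv

theorem zip_map_snd {β : Type} (g : List Int → List (List Int)) (h : List Int × List (List Int) → β) :
    ∀ (l : List (List Int)), (l.zip (l.map g)).map h = l.map (fun t => h (t, g t)) := by
  intro l
  induction l with
  | nil => rfl
  | cons x l ih => simp only [List.map_cons, List.zip_cons_cons, ih]

-- ===== VERDICT =====
theorem find_plagiarism_spec : Claim_equal_find_plagiarism := by
  intro tt gt n _
  unfold Spec_find_plagiarism find_plagiarism find_plagiarism_alt
  simp only [index_third]
  rw [PySem.List.foldl_append_singleton_eq_map, PySem.List.foldl_append_singleton_eq_map,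
    List.nil_append, List.nil_append, List.map_map,
    zip_map_snd (g := fun t => get_ngramsA t n)]
  apply List.map_congr_left
  intro tune _
  dsimp only [Function.comp_apply]
  -- B's per-tune loop over range indices is a loop over this tune's ngram list
  have hmap : (PySem.List.pyRange 0 ((tune.length : Int) - n + 1) 1).foldl
      (fun d i =>
        let ng := PySem.List.slice tune (some i) (some (i + n))
        if d.contains ng then d else d.insert ng (occB tt n ng)) PySem.Dict.empty =
      (get_ngramsA tune n).foldl
        (fun d ng => if d.contains ng then d else d.insert ng (occB tt n ng)) PySem.Dict.empty := by
    unfold get_ngramsA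
    rw [List.foldl_map]
  rw [hmap, guard_fold (occB tt n) _ _ (by simp [PySem.Dict.keys_empty]) (by simp)]
  have hf : ∀ ng, occB tt n ng = (index_ngramsA tt n).1.getD ng 0 := by
    intro ng; rw [occB_eq, index_total_getD]
  simp only [hf]
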